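-- pv_equiv track=rewrite | github.com/kiraskywing/Code_Practice | CodeSignal/rearranged-array-is-acsending.py | solution
-- ===== SOURCE A (Python) =====
-- def solution(a):
--     n = len(a)
--     left, right = 0, n - 1
--     prev, cur = left, right
--     left += 1
--
--     for i in range(1, n):
--         if a[prev] >= a[cur]:
--             return False
--
--         prev = cur
--         if i % 2 == 0:
--             left += 1
--             cur = right
--         else:
--             right -= 1
--             cur = left
--
--     return True
-- ===== SOURCE B (Python) =====
-- def solution(a):
--     n = len(a)
--     return (all(a[k] < a[n - 1 - k] for k in range(n // 2))
--             and all(a[n - 1 - k] < a[k + 1] for k in range((n - 1) // 2)))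
-- ===== Notes on version B (the rewrite author's own statement) =====
-- stated objective: simpler
-- what changed: A simulates the zigzag with a stateful two-pointer walk (prev/cur/left/right mutated per step); B uses the closed-form index pairing of that order and just checks a[k] < a[n-1-k] for k < n//2 and a[n-1-k] < a[k+1] for k < (n-1)//2, with no pointer state and no early-exit loop.
import Mathlib
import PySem

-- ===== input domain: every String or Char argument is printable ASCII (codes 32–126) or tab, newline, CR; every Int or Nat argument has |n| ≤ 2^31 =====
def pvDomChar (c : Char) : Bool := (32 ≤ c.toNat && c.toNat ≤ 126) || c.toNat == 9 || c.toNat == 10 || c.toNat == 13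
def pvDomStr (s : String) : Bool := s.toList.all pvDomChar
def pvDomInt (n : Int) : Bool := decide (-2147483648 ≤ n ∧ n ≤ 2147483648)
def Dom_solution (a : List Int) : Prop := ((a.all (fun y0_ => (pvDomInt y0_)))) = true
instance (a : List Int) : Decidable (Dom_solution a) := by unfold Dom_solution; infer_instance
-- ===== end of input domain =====

-- B replaces A's fused two-pointer walk by a closed-form pairing: a[k] < a[n-1-k] for the even steps and a[n-1-k] < a[k+1] for the odd steps (simpler; same cost).


-- ===== PORT A =====
-- the loop 'for i in range(1, n)' with early return False; fuel = number of remaining iterations.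
-- a[prev] / a[cur] are ported as pyGetD _ _ 0: every index A ever reads is in range (the two-pointer
-- indices enumerate 0..n-1), so the default is never used and the port is exact.
def solutionGo (a : List Int) : Nat → Int → Int → Int → Int → Int → Bool
  | 0, _, _, _, _, _ => true
  | k + 1, i, prev, cur, left, right =>
    if PySem.List.pyGetD a prev 0 ≥ PySem.List.pyGetD a cur 0 then false
    else if i % 2 == 0 then
      solutionGo a k (i + 1) cur right (left + 1) right
    else
      solutionGo a k (i + 1) cur left left (right - 1)

def solution (a : List Int) : Bool :=
  let n : Int := a.length
  let left : Int := 0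
  let right : Int := n - 1
  let prev := left
  let cur := right
  let left := left + 1
  solutionGo a (n - 1).toNat 1 prev cur left right

-- ===== PORT B =====
-- Source B: n = len(a); all(a[k] < a[n-1-k] for k in range(n//2)) and all(a[n-1-k] < a[k+1] for k in range((n-1)//2)).
-- All accessed indices are in range, so pyGetD's default is never used and the port is exact.
def solution_alt (a : List Int) : Bool :=
  let n : Int := a.length
  ((List.range (a.length / 2)).all
      (fun k => decide (PySem.List.pyGetD a (k : Int) 0 < PySem.List.pyGetD a (n - 1 - (k : Int)) 0)))
  && ((List.range ((a.length - 1) / 2)).all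
      (fun k => decide (PySem.List.pyGetD a (n - 1 - (k : Int)) 0 < PySem.List.pyGetD a ((k : Int) + 1) 0)))

-- ===== PRECONDITION & SPEC =====
def Spec_solution (a : List Int) (out : Bool) : Prop := out = solution_alt a
instance (a : List Int) (out : Bool) : Decidable (Spec_solution a out) := by unfold Spec_solution; infer_instance

-- ===== CLAIM (what is proved, stated in full; the proofs are below) =====
def Claim_equal_solution : Prop := ∀ (a : List Int), Dom_solution a → Spec_solution a (solution a)

-- ===== LEMMAS AND PROOFS =====

-- the zigzag index at position j (of n positions): front j/2 on even j, back n-1-j/2 on odd j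
def zig (n j : Nat) : Int := if j % 2 = 0 then ((j / 2 : Nat) : Int) else (n : Int) - 1 - ((j / 2 : Nat) : Int)

theorem all_congr_mem {α : Type} {l : List α} {p q : α → Bool}
    (h : ∀ x ∈ l, p x = q x) : l.all p = l.all q := by
  induction l with
  | nil => rfl
  | cons x xs ih =>
    simp only [List.all_cons]
    rw [h x (List.mem_cons_self), ih (fun y hy => h y (List.mem_cons_of_mem _ hy))]

theorem solutionGo_eq (a : List Int) (n : Nat) : ∀ (k i : Nat), 1 ≤ i → i + k = n →
    solutionGo a k (i : Int) (zig n (i - 1)) (zig n i)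
      (((i + 1) / 2 : Nat) : Int) ((n : Int) - 1 - ((i / 2 : Nat) : Int))
    = (List.range' i k).all
        (fun j => decide (PySem.List.pyGetD a (zig n (j - 1)) 0 < PySem.List.pyGetD a (zig n j) 0)) := by
  intro k
  induction k with
  | zero => intro i _ _; simp [solutionGo]
  | succ k ih =>
    intro i hi hik
    rw [List.range'_succ]
    simp only [solutionGo, List.all_cons]
    by_cases hge : PySem.List.pyGetD a (zig n (i - 1)) 0 ≥ PySem.List.pyGetD a (zig n i) 0
    · simp [hge]
    · have hlt : PySem.List.pyGetD a (zig n (i - 1)) 0 < PySem.List.pyGetD a (zig n i) 0 := by omega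
      simp only [if_neg hge, hlt, decide_true, Bool.true_and]
      rcases Nat.mod_two_eq_zero_or_one i with h | h
      · have hpar : ((i : Int) % 2 == 0) = true := by simp; omega
        rw [hpar, if_pos rfl]
        have e1 : zig n i = zig n ((i + 1) - 1) := by norm_num
        have e2 : (n : Int) - 1 - ((i / 2 : Nat) : Int) = zig n (i + 1) := by
          have hp : (i + 1) % 2 = 1 := by omega
          have hq : (i + 1) / 2 = i / 2 := by omega
          simp [zig, hp, hq]
        have e3 : (((i + 1) / 2 : Nat) : Int) + 1 = (((i + 1 + 1) / 2 : Nat) : Int) := by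
          have h2 : (i + 1 + 1) / 2 = (i + 1) / 2 + 1 := by omega
          rw [h2]; push_cast; ring
        have e4 : (n : Int) - 1 - ((i / 2 : Nat) : Int)
            = (n : Int) - 1 - (((i + 1) / 2 : Nat) : Int) := by
          have h2 : (i + 1) / 2 = i / 2 := by omega
          rw [h2]
        have e5 : ((i : Int) + 1) = (((i + 1 : Nat) : Nat) : Int) := by push_cast; ring
        rw [e5, e1]
        nth_rewrite 1 [e2]
        rw [e3]
        rw [e4]
        rw [ih (i + 1) (by omega) (by omega)]
      · have hpar : ((i : Int) % 2 == 0) = false := by simp; omega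
        rw [hpar]
        simp only [Bool.false_eq_true, if_false]
        have e1 : zig n i = zig n ((i + 1) - 1) := by norm_num
        have e2 : (((i + 1) / 2 : Nat) : Int) = zig n (i + 1) := by
          have hp : (i + 1) % 2 = 0 := by omega
          simp [zig, hp]
        have e3 : (((i + 1) / 2 : Nat) : Int) = (((i + 1 + 1) / 2 : Nat) : Int) := by
          have h2 : (i + 1 + 1) / 2 = (i + 1) / 2 := by omega
          rw [h2]
        have e4 : (n : Int) - 1 - ((i / 2 : Nat) : Int) - 1
            = (n : Int) - 1 - (((i + 1) / 2 : Nat) : Int) := by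
          have h2 : (i + 1) / 2 = i / 2 + 1 := by omega
          rw [h2]; push_cast; ring
        have e5 : ((i : Int) + 1) = (((i + 1 : Nat) : Nat) : Int) := by push_cast; ring
        rw [e5, e1]
        nth_rewrite 1 [e2]
        nth_rewrite 1 [e3]
        rw [e4]
        rw [ih (i + 1) (by omega) (by omega)]

-- A's result characterised: strict ascent of the zigzag order, position by position
theorem solution_eq_all (a : List Int) :
    solution a = (List.range (a.length - 1)).all
      (fun j => decide (PySem.List.pyGetD a (zig a.length j) 0 < PySem.List.pyGetD a (zig a.length (j + 1)) 0)) := by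
  rcases Nat.eq_zero_or_pos a.length with h0 | hpos
  · have hnil : a = [] := List.eq_nil_of_length_eq_zero h0
    subst hnil; rfl
  · have hsol : solution a
        = solutionGo a ((a.length : Int) - 1).toNat 1 0 ((a.length : Int) - 1) (0 + 1) ((a.length : Int) - 1) := rfl
    have hkey := solutionGo_eq a a.length (a.length - 1) 1 (by omega) (by omega)
    have hz0 : zig a.length (1 - 1) = 0 := by simp [zig]
    have hz1 : zig a.length 1 = (a.length : Int) - 1 := by simp [zig]
    rw [hz0, hz1] at hkey
    norm_num at hkey
    have hfuel : ((a.length : Int) - 1).toNat = a.length - 1 := by omega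
    rw [hsol, hfuel]
    norm_num
    rw [hkey]
    rw [List.range'_eq_map_range, List.all_map]
    apply all_congr_mem
    intro i _
    simp only [Function.comp, Nat.add_comm 1 i, Nat.add_sub_cancel]

theorem zig_two_mul (n k : Nat) : zig n (2 * k) = (k : Int) := by
  have h1 : (2 * k) % 2 = 0 := by omega
  have h2 : (2 * k) / 2 = k := by omega
  simp [zig, h1, h2]

theorem zig_two_mul_add_one (n k : Nat) : zig n (2 * k + 1) = (n : Int) - 1 - (k : Int) := by
  have h1 : (2 * k + 1) % 2 = 1 := by omega
  have h2 : (2 * k + 1) / 2 = k := by omega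
  simp [zig, h1, h2]

-- ===== VERDICT (by name: the statement is the Claim_ definition above) =====
theorem solution_spec : Claim_equal_solution := by
  intro a _
  unfold Spec_solution
  rw [solution_eq_all]
  unfold solution_alt
  simp only []
  rw [Bool.eq_iff_iff]
  simp only [List.all_eq_true, List.mem_range, decide_eq_true_eq, Bool.and_eq_true]
  set n := a.length with hn
  constructor
  · intro h
    refine ⟨fun k hk => ?_, fun k hk => ?_⟩
    · have := h (2 * k) (by omega)
      rwa [zig_two_mul, show 2 * k + 1 = 2 * k + 1 from rfl, zig_two_mul_add_one] at this
    · have := h (2 * k + 1) (by omega)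
      rwa [zig_two_mul_add_one, show 2 * k + 1 + 1 = 2 * (k + 1) from by ring, zig_two_mul,
        Nat.cast_add, Nat.cast_one] at this
  · rintro ⟨h1, h2⟩ j hj
    rcases Nat.mod_two_eq_zero_or_one j with hpar | hpar
    · have hj2 : j = 2 * (j / 2) := by omega
      rw [hj2, zig_two_mul, show 2 * (j / 2) + 1 = 2 * (j / 2) + 1 from rfl, zig_two_mul_add_one]
      exact h1 (j / 2) (by omega)
    · have hj2 : j = 2 * (j / 2) + 1 := by omega
      rw [hj2, zig_two_mul_add_one, show 2 * (j / 2) + 1 + 1 = 2 * (j / 2 + 1) from by ring,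
        zig_two_mul, Nat.cast_add, Nat.cast_one]
      exact h2 (j / 2) (by omega)
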